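-- pv_equiv track=rewrite | github.com/rogerkratz1-sys/ingarden-project | scripts/motif_stability_test.py | classify_first_violated
-- ===== SOURCE A (Python) =====
-- def classify_first_violated(violated_set, cover_check_order):
--     # 1. GlobalDistortion — many violations (4 or more).
--     if len(violated_set) >= 4:
--         return "GlobalDistortion"
--     # 2. FrontEndMove — violates any front covers (1,3), (1,4), (1,5).
--     front = {(1, 3), (1, 4), (1, 5)}
--     for cov in cover_check_order:
--         if cov in violated_set and cov in front:
--             return "FrontEndMove"
--     # 3. BlockReorderExtreme — violates any block/chain covers among the set
--     bre_set = {(3, 8), (4, 8), (5, 6), (6, 7), (7, 8), (8, 9)}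
--     for cov in cover_check_order:
--         if cov in violated_set and cov in bre_set:
--             return "BlockReorderExtreme"
--     # 4. DualClusterOutlier — violates at least one early cover and at least one late cover
--     early = front
--     late = {(9, 10), (10, 11), (11, 12)}
--     if any(c in violated_set for c in early) and any(c in violated_set for c in late):
--         for cov in cover_check_order:
--             if cov in violated_set and (cov in early or cov in late):
--                 return "DualClusterOutlier"
--     # 5. AnchorPreservingDisorder — has violations but does not violate any front covers
--     if len(violated_set) > 0 and not any(c in violated_set for c in front):
--         return "AnchorPreservingDisorder"
--     # 6. Other
--     return "Other"
-- ===== SOURCE B (Python) =====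
-- FRONT = {(1, 3), (1, 4), (1, 5)}
-- BRE = {(3, 8), (4, 8), (5, 6), (6, 7), (7, 8), (8, 9)}
-- LATE = {(9, 10), (10, 11), (11, 12)}
--
--
-- def classify_first_violated(violated_set, cover_check_order):
--     if len(violated_set) >= 4:
--         return "GlobalDistortion"
--     # single pass over cover_check_order collecting which categories were hit
--     hit_front = hit_bre = hit_edge = False
--     for cov in cover_check_order:
--         if cov in violated_set:
--             if cov in FRONT:
--                 hit_front = True
--                 hit_edge = True
--             elif cov in BRE:
--                 hit_bre = True
--             elif cov in LATE:
--                 hit_edge = True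
--     # unrestricted facts about violated_set (for the step-4 gate and step-5 check)
--     has_front = any(c in violated_set for c in FRONT)
--     has_late = any(c in violated_set for c in LATE)
--     if hit_front:
--         return "FrontEndMove"
--     if hit_bre:
--         return "BlockReorderExtreme"
--     if has_front and has_late and hit_edge:
--         return "DualClusterOutlier"
--     if len(violated_set) > 0 and not has_front:
--         return "AnchorPreservingDisorder"
--     return "Other"
-- ===== Notes on version B (the rewrite author's own statement) =====
-- stated objective: alternative
-- what changed: Replaces A's three separate early-return scans of cover_check_order by one single pass that accumulates hit_front/hit_bre/hit_edge flags, followed by a flat priority decision using the unrestricted violated_set facts.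
import Mathlib
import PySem

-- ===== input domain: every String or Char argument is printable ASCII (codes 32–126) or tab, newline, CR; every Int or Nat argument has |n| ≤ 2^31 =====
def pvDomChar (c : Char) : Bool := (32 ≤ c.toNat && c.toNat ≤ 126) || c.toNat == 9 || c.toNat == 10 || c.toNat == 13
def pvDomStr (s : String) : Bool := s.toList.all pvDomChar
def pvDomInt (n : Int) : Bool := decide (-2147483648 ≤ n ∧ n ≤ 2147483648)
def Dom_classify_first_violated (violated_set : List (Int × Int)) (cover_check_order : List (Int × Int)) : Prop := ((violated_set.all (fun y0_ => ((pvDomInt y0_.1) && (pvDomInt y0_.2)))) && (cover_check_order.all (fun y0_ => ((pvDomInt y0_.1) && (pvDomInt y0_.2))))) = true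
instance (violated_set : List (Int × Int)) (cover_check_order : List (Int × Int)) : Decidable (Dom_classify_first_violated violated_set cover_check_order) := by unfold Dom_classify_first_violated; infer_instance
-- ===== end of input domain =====

-- B replaces A's three separate early-return scans of cover_check_order by one single pass
-- accumulating hit flags, then a flat priority decision (alternative decomposition, same cost).


-- ===== PORT A =====
-- A's literal constant sets (Python set literals → lists of their distinct elements)
def aFront : List (Int × Int) := [(1, 3), (1, 4), (1, 5)]
def aBre : List (Int × Int) := [(3, 8), (4, 8), (5, 6), (6, 7), (7, 8), (8, 9)]
def aLate : List (Int × Int) := [(9, 10), (10, 11), (11, 12)]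

def classify_first_violated (violated_set : List (Int × Int)) (cover_check_order : List (Int × Int)) : String :=
  if violated_set.length ≥ 4 then "GlobalDistortion"
  else if cover_check_order.any (fun cov => violated_set.contains cov && aFront.contains cov) then "FrontEndMove"
  else if cover_check_order.any (fun cov => violated_set.contains cov && aBre.contains cov) then "BlockReorderExtreme"
  else if (aFront.any violated_set.contains && aLate.any violated_set.contains) &&
          cover_check_order.any (fun cov => violated_set.contains cov && (aFront.contains cov || aLate.contains cov)) then
    "DualClusterOutlier"
  else if decide (violated_set.length > 0) && !(aFront.any violated_set.contains) then "AnchorPreservingDisorder"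
  else "Other"

-- ===== PORT B =====
def bFRONT : List (Int × Int) := [(1, 3), (1, 4), (1, 5)]
def bBRE : List (Int × Int) := [(3, 8), (4, 8), (5, 6), (6, 7), (7, 8), (8, 9)]
def bLATE : List (Int × Int) := [(9, 10), (10, 11), (11, 12)]

-- the single pass: accumulates (hit_front, hit_bre, hit_edge)
def bLoop (vs : List (Int × Int)) : List (Int × Int) → Bool × Bool × Bool → Bool × Bool × Bool
  | [], st => st
  | cov :: rest, (f, b, e) =>
    bLoop vs rest
      (if vs.contains cov then
        if bFRONT.contains cov then (true, b, true)
        else if bBRE.contains cov then (f, true, e)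
        else if bLATE.contains cov then (f, b, true)
        else (f, b, e)
      else (f, b, e))

def classify_first_violated_alt (violated_set : List (Int × Int)) (cover_check_order : List (Int × Int)) : String :=
  if violated_set.length ≥ 4 then "GlobalDistortion"
  else
    let st := bLoop violated_set cover_check_order (false, false, false)
    let hasFront := bFRONT.any violated_set.contains
    let hasLate := bLATE.any violated_set.contains
    if st.1 then "FrontEndMove"
    else if st.2.1 then "BlockReorderExtreme"
    else if hasFront && hasLate && st.2.2 then "DualClusterOutlier"
    else if decide (violated_set.length > 0) && !hasFront then "AnchorPreservingDisorder"
    else "Other"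

-- ===== PRECONDITION & SPEC =====
def Spec_classify_first_violated (violated_set : List (Int × Int)) (cover_check_order : List (Int × Int)) (out : String) : Prop := out = classify_first_violated_alt violated_set cover_check_order
instance (violated_set : List (Int × Int)) (cover_check_order : List (Int × Int)) (out : String) : Decidable (Spec_classify_first_violated violated_set cover_check_order out) := by unfold Spec_classify_first_violated; infer_instance

-- ===== CLAIM (what is proved, stated in full; the proofs are below) =====
def Claim_equal_classify_first_violated : Prop := ∀ (violated_set : List (Int × Int)) (cover_check_order : List (Int × Int)), Dom_classify_first_violated violated_set cover_check_order → Spec_classify_first_violated violated_set cover_check_order (classify_first_violated violated_set cover_check_order)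

-- ===== LEMMAS AND PROOFS =====

-- the three category sets are pairwise disjoint
theorem bLoop_eq (vs : List (Int × Int)) :
    ∀ (order : List (Int × Int)) (f b e : Bool),
      bLoop vs order (f, b, e) =
        (f || order.any (fun c => vs.contains c && bFRONT.contains c),
         b || order.any (fun c => vs.contains c && bBRE.contains c),
         e || order.any (fun c => vs.contains c && (bFRONT.contains c || bLATE.contains c))) := by
  intro order
  induction order with
  | nil => intro f b e; simp [bLoop]
  | cons c rest ih =>
    intro f b e
    simp only [bLoop, List.any_cons]
    by_cases hv : c ∈ vs <;>
      by_cases hf : c ∈ bFRONT <;>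
        by_cases hb : c ∈ bBRE <;>
          by_cases hl : c ∈ bLATE
    all_goals try simp [hv, hf, hb, hl, ih]
    -- remaining goals have contradictory membership hypotheses (the three sets are disjoint)
    all_goals (exfalso; revert hf hb hl; obtain ⟨x, y⟩ := c;
               simp [bFRONT, bBRE, bLATE, Prod.ext_iff]; omega)

theorem classify_eq (vs order : List (Int × Int)) :
    classify_first_violated vs order = classify_first_violated_alt vs order := by
  unfold classify_first_violated classify_first_violated_alt
  rw [bLoop_eq]
  rfl

-- ===== VERDICT (by name: the statement is the Claim_ definition above) =====
theorem classify_first_violated_spec : Claim_equal_classify_first_violated := by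
  intro vs order _
  unfold Spec_classify_first_violated
  exact classify_eq vs order
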